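-- pv_equiv track=rewrite | github.com/maquino1985/AbSequenceAlign | scripts/analyze_databases.py | select_best_database
-- ===== SOURCE A (Python) =====
-- from typing import Dict, List, Set
--
-- def select_best_database(databases: List[Dict], organism: str, gene_type: str) -> Dict:
--     """Select the best database from multiple options."""
--     if len(databases) == 1:
--         return databases[0]
--
--     # Prefer AIRR format databases
--     airr_dbs = [db for db in databases if 'airr' in db['name'].lower()]
--     if airr_dbs:
--         return airr_dbs[0]
--
--     # Prefer standard naming conventions
--     standard_dbs = [db for db in databases if not any(strain in db['name'] for strain in ['C57BL', 'BALB', 'C3H', 'DBA'])]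
--     if standard_dbs:
--         return standard_dbs[0]
--
--     # Default to first database
--     return databases[0]
-- ===== SOURCE B (Python) =====
-- def select_best_database(databases, organism, gene_type):
--     """Select the best database from multiple options (single ordered pass)."""
--     if len(databases) == 1:
--         return databases[0]
--     first_standard = None
--     for db in databases:
--         name = db['name']
--         if 'airr' in name.lower():
--             return db
--         if first_standard is None and not any(strain in name for strain in ['C57BL', 'BALB', 'C3H', 'DBA']):
--             first_standard = db
--     return first_standard if first_standard is not None else databases[0]
-- ===== Notes on version B (the rewrite author's own statement) =====
-- stated objective: alternative
-- what changed: Replaces A's two full list-comprehension scans (airr filter, then standard-name filter) with a single ordered pass that returns the first AIRR database immediately and tracks the first standard-named database in an accumulator.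
import Mathlib
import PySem

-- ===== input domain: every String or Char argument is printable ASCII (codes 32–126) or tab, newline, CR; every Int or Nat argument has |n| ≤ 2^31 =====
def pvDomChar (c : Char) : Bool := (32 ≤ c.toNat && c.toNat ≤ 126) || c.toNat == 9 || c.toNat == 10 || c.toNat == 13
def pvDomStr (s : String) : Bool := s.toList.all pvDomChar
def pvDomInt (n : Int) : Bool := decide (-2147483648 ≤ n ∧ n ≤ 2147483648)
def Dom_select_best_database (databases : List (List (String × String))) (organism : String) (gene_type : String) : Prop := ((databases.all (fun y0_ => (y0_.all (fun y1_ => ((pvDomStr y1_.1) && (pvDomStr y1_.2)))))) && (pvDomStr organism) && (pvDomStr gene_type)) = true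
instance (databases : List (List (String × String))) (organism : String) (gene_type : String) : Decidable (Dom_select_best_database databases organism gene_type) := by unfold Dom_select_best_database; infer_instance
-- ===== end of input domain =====

-- B replaces A's two full filter scans with one ordered pass (early return on the
-- first AIRR name, accumulator for the first standard name): an alternative
-- decomposition of the same O(n*m) selection.


-- ===== PORT A =====
-- db['name']: first-match dict lookup; Pre_ guarantees the key is present, so the
-- `.getD ""` default is never the value used on an admitted input.
def pvName (db : List (String × String)) : String :=
  ((PySem.Dict.mk db).get? "name").getD ""

-- 'airr' in db['name'].lower()
def pvIsAirr (db : List (String × String)) : Bool :=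
  PySem.Str.isIn "airr" (PySem.Str.lower (pvName db))

-- not any(strain in db['name'] for strain in ['C57BL', 'BALB', 'C3H', 'DBA'])
def pvIsStandard (db : List (String × String)) : Bool :=
  !(["C57BL", "BALB", "C3H", "DBA"].any (fun strain => PySem.Str.isIn strain (pvName db)))

def select_best_database (databases : List (List (String × String))) (organism : String) (gene_type : String) : List (String × String) :=
  if databases.length = 1 then (PySem.List.pyGet? databases 0).getD []
  else
    let airr_dbs := databases.filter pvIsAirr
    if airr_dbs ≠ [] then airr_dbs.headD []
    else
      let standard_dbs := databases.filter pvIsStandard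
      if standard_dbs ≠ [] then standard_dbs.headD []
      else (PySem.List.pyGet? databases 0).getD []

-- ===== PORT B =====
-- the single for-loop of Source B: early return on AIRR, first_standard accumulator,
-- after the loop first_standard or databases[0]
def pvLoopB (databases0 : List (List (String × String))) :
    List (List (String × String)) → Option (List (String × String)) → List (String × String)
  | [], first_standard =>
      match first_standard with
      | some db => db
      | none => (PySem.List.pyGet? databases0 0).getD []
  | db :: rest, first_standard =>
      if pvIsAirr db then db
      else pvLoopB databases0 rest
        (if first_standard.isNone && pvIsStandard db then some db else first_standard)

def select_best_database_alt (databases : List (List (String × String))) (organism : String) (gene_type : String) : List (String × String) :=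
  if databases.length = 1 then (PySem.List.pyGet? databases 0).getD []
  else pvLoopB databases databases none

-- ===== PRECONDITION & SPEC =====
-- Pre_ excludes exactly the inputs on which the Python raises: the empty list
-- (IndexError on databases[0]) and, when len(databases) != 1, a db without the
-- key 'name' (KeyError in the comprehensions).
def Pre_select_best_database (databases : List (List (String × String))) (organism : String) (gene_type : String) : Prop :=
  databases ≠ [] ∧ (databases.length = 1 ∨ ∀ db ∈ databases, ((PySem.Dict.mk db).get? "name").isSome)
instance (databases : List (List (String × String))) (organism : String) (gene_type : String) : Decidable (Pre_select_best_database databases organism gene_type) := by unfold Pre_select_best_database; infer_instance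

def pvWitness_select_best_database : (List (List (String × String))) × String × String :=
  ([[("name", "mouse_C57BL_V")], [("name", "mouse_airr_V")]], "mouse", "V")

def Spec_select_best_database (databases : List (List (String × String))) (organism : String) (gene_type : String) (out : List (String × String)) : Prop := out = select_best_database_alt databases organism gene_type
instance (databases : List (List (String × String))) (organism : String) (gene_type : String) (out : List (String × String)) : Decidable (Spec_select_best_database databases organism gene_type out) := by unfold Spec_select_best_database; infer_instance

-- ===== CLAIM (what is proved, stated in full; the proofs are below) =====
def Claim_equal_select_best_database : Prop := ∀ (databases : List (List (String × String))) (organism : String) (gene_type : String), Dom_select_best_database databases organism gene_type → Pre_select_best_database databases organism gene_type → Spec_select_best_database databases organism gene_type (select_best_database databases organism gene_type)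

-- ===== LEMMAS AND PROOFS =====

-- characterisation of B's loop: first AIRR db wins; otherwise the accumulator,
-- seeded with the first standard db; otherwise databases0[0]
theorem pvLoopB_eq (databases0 : List (List (String × String)))
    (l : List (List (String × String))) (fs : Option (List (String × String))) :
    pvLoopB databases0 l fs =
      match l.find? pvIsAirr with
      | some db => db
      | none =>
        match fs with
        | some db => db
        | none =>
          match l.find? pvIsStandard with
          | some db => db
          | none => (PySem.List.pyGet? databases0 0).getD [] := by
  induction l generalizing fs with
  | nil => cases fs <;> rfl
  | cons db rest ih =>
    by_cases ha : pvIsAirr db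
    · simp [pvLoopB, ha, List.find?_cons_of_pos]
    · rw [List.find?_cons_of_neg (by simp [ha])]
      cases fs with
      | some d => simp [pvLoopB, ha, ih]
      | none =>
        by_cases hs : pvIsStandard db
        · simp [pvLoopB, ha, hs, ih, List.find?_cons_of_pos]
        · rw [List.find?_cons_of_neg (by simp [hs])]
          simp [pvLoopB, ha, hs, ih]

theorem select_best_database_spec : Claim_equal_select_best_database := by
  intro databases organism gene_type _hdom _hpre
  unfold Spec_select_best_database select_best_database select_best_database_alt
  by_cases h1 : databases.length = 1
  · simp [h1]
  · simp only [h1, if_false]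
    rw [pvLoopB_eq]
    rcases hfa : databases.find? pvIsAirr with _ | db
    · have hea : databases.filter pvIsAirr = [] := by
        rw [List.filter_eq_nil_iff]
        intro x hx
        simpa using List.find?_eq_none.mp hfa x hx
      rcases hfs : databases.find? pvIsStandard with _ | db
      · have hes : databases.filter pvIsStandard = [] := by
          rw [List.filter_eq_nil_iff]
          intro x hx
          simpa using List.find?_eq_none.mp hfs x hx
        simp [hea, hes]
      · have hhd : (databases.filter pvIsStandard).head? = some db := by
          rw [List.head?_filter, hfs]
        rcases hfil : databases.filter pvIsStandard with _ | ⟨a, t⟩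
        · rw [hfil] at hhd; simp at hhd
        · rw [hfil] at hhd
          simp at hhd
          simp [hea, hhd]
    · have hhd : (databases.filter pvIsAirr).head? = some db := by
        rw [List.head?_filter, hfa]
      rcases hfil : databases.filter pvIsAirr with _ | ⟨a, t⟩
      · rw [hfil] at hhd; simp at hhd
      · rw [hfil] at hhd
        simp at hhd
        simp [hhd]
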